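-- pv_equiv track=rewrite | github.com/ThetaMKZ621/NeteaseCloudMusic | Versions/1.0.10.py | list_to_name
-- ===== SOURCE A (Python) =====
-- def list_to_name(list):
--     filename = ""
--     number = 0
--     for n in list:
--         if number == 0:
--             filename = filename + n
--             number += 1
--         elif number == len(list) - 1:
--             filename = filename + ' - ' + n
--         else:
--             filename = filename + ',' + n
--             number += 1
--     return filename
-- ===== SOURCE B (Python) =====
-- def list_to_name(list):
--     if not list:
--         return ""
--     if len(list) == 1:
--         return list[0]
--     return ",".join(list[:-1]) + " - " + list[-1]
-- ===== Notes on version B (the rewrite author's own statement) =====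
-- stated objective: simpler
-- what changed: Replaces the per-element counter/branch accumulation loop with a head/tail decomposition: two edge cases plus a single ','-join of list[:-1] with ' - ' + list[-1] appended.
import Mathlib
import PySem

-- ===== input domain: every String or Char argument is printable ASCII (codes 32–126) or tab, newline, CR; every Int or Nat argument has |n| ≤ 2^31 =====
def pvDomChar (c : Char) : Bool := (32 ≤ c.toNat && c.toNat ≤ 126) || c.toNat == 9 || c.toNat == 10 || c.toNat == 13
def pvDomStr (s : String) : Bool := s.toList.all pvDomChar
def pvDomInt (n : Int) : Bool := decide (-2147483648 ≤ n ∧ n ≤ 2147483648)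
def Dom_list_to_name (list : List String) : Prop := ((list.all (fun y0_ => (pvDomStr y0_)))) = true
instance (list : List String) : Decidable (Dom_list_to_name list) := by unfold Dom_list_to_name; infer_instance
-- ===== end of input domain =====

-- B replaces A's counter-and-branch concatenation loop by two edge cases plus a single
-- comma-join of list[:-1] followed by ' - ' + list[-1] (same return value; B is simpler).

-- ===== PORT A =====
-- the for-loop of A: state (filename, number), branches in A's order; strings as List Char
def pvLoopA (L : Int) : List (List Char) → List Char → Int → List Char
  | [], filename, _ => filename
  | n :: rest, filename, number =>
    if number = 0 then pvLoopA L rest (filename ++ n) (number + 1)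
    else if number = L - 1 then pvLoopA L rest (filename ++ [' ', '-', ' '] ++ n) number
    else pvLoopA L rest (filename ++ [','] ++ n) (number + 1)

def list_to_name (list : List String) : String :=
  String.ofList (pvLoopA (list.length : Int) (list.map String.toList) [] 0)

-- ===== PORT B =====
def list_to_name_alt (list : List String) : String :=
  if list = [] then ""
  else if list.length = 1 then list.headD ""
  else String.ofList
    (List.intercalate [','] (list.dropLast.map String.toList)
      ++ [' ', '-', ' '] ++ (list.getLastD "").toList)

-- ===== PRECONDITION & SPEC =====
def Spec_list_to_name (list : List String) (out : String) : Prop := out = list_to_name_alt list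
instance (list : List String) (out : String) : Decidable (Spec_list_to_name list out) := by unfold Spec_list_to_name; infer_instance

-- ===== CLAIM (what is proved, stated in full; the proofs are below) =====
def Claim_equal_list_to_name : Prop := ∀ (list : List String), Dom_list_to_name list → Spec_list_to_name list (list_to_name list)

-- ===== LEMMAS AND PROOFS =====

-- after the first element, A's loop with counter k (1 ≤ k) over a nonempty remainder
-- appends ','-prefixed middle elements and a ' - '-prefixed last element
lemma pvLoopA_spec (rest : List (List Char)) (f : List Char) (k : Int)
    (hne : rest ≠ []) (hk : 1 ≤ k) :
    pvLoopA (k + rest.length) rest f k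
      = f ++ rest.dropLast.flatMap (fun d => ',' :: d) ++ [' ', '-', ' '] ++ rest.getLastD [] := by
  induction rest generalizing f k with
  | nil => exact absurd rfl hne
  | cons n rest' ih =>
    cases rest' with
    | nil =>
      simp only [pvLoopA, List.length_cons, List.length_nil]
      rw [if_neg (by omega), if_pos (by omega)]
      simp
    | cons m rest'' =>
      rw [pvLoopA]
      rw [if_neg (by omega), if_neg (by push_cast [List.length_cons]; omega)]
      rw [show k + (((n :: m :: rest'').length : Nat) : Int)
          = (k + 1) + (((m :: rest'').length : Nat) : Int) by push_cast [List.length_cons]; omega]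
      rw [ih (f ++ [','] ++ n) (k + 1) (by simp) (by omega)]
      simp

-- B's intercalate over x :: ds is x followed by the ','-prefixed tail elements
lemma pvIntercalate_cons (x : List Char) (ds : List (List Char)) :
    List.intercalate [','] (x :: ds) = x ++ ds.flatMap (fun d => ',' :: d) := by
  induction ds generalizing x with
  | nil => simp [List.intercalate]
  | cons d ds ih =>
    simp only [List.intercalate] at *
    simp only [List.intersperse] at *
    simp_all [List.flatten]

lemma pvGetLastD_toList (y : String) (rest : List String) :
    ((y :: rest).map String.toList).getLastD [] = ((y :: rest).getLastD "").toList := by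
  induction rest generalizing y with
  | nil => rfl
  | cons z rest ih => simpa [List.getLastD_cons] using ih z

-- ===== VERDICT (by name: the statement is the Claim_ definition above) =====
theorem list_to_name_spec : Claim_equal_list_to_name := by
  intro list _
  unfold Spec_list_to_name list_to_name list_to_name_alt
  match list with
  | [] => rfl
  | [x] => simp [pvLoopA, String.ofList_toList]
  | x :: y :: rest =>
    rw [if_neg (by simp), if_neg (by simp)]
    rw [show ((x :: y :: rest).map String.toList) = x.toList :: ((y :: rest).map String.toList) from rfl]
    rw [pvLoopA, if_pos rfl]
    rw [show (((x :: y :: rest).length : Nat) : Int)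
        = (0 + 1) + (((y :: rest).map String.toList).length : Int) by push_cast; simp; omega]
    rw [pvLoopA_spec _ _ (0 + 1) (by simp) (by omega)]
    have hdl : (x :: y :: rest).dropLast.map String.toList
        = x.toList :: ((y :: rest).map String.toList).dropLast := by
      simp [List.map_dropLast]
    rw [hdl, pvIntercalate_cons]
    rw [show (x :: y :: rest).getLastD "" = (y :: rest).getLastD "" from List.getLastD_cons ..]
    rw [← pvGetLastD_toList]
    simp
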